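-- pv_equiv track=rewrite | github.com/seonghorang/coding-test | 프로그래머스/lv1/1845. 폰켓몬/폰켓몬.py | solution
-- ===== SOURCE A (Python) =====
-- def solution(nums):
--     ### 각 번호별 빈도수 체크를 위한 딕셔너리
--     cnt={}
--     ### 딕셔너리에 번호가 있으면 그 번호 빈도수 1증가
--     ### 없으면 번호 추가하고 빈도수 1
--     for n in nums:
--         if n in cnt:
--             cnt[n] += 1
--         else:
--             cnt[n] = 1
--     ### n/2와 종류갯수 계산
--     answer = min(len(nums)//2,len(cnt))
--     return answer
-- ===== SOURCE B (Python) =====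
-- def solution(nums):
--     s = sorted(nums)
--     distinct = 0
--     prev = None
--     for x in s:
--         if prev is None or x != prev:
--             distinct += 1
--         prev = x
--     return min(len(nums) // 2, distinct)
-- ===== Notes on version B (the rewrite author's own statement) =====
-- stated objective: alternative
-- what changed: Replaces the hash-dict frequency table with sorting a copy and counting distinct values in one adjacency pass over the sorted list.
import Mathlib
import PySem

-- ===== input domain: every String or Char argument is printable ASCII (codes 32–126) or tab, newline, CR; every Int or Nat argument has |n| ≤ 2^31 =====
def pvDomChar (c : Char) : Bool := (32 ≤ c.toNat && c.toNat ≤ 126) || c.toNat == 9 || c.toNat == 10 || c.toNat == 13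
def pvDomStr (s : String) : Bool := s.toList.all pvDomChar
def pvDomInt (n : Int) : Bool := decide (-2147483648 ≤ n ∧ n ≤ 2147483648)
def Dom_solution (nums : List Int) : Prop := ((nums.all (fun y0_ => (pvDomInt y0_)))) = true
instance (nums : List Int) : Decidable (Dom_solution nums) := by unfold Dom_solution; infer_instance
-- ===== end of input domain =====

-- B replaces A's hash-dict frequency table by sorting a copy of nums and counting
-- distinct values in one adjacency pass (alternative algorithm, not claimed faster).


-- ===== PORT A =====
def solution (nums : List Int) : Int :=
  let cnt : PySem.Dict Int Int :=
    nums.foldl (fun d n =>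
      if d.contains n then d.insert n (d.getD n 0 + 1) else d.insert n 1)
      PySem.Dict.empty
  min (PySem.Int.floordiv (nums.length : Int) 2) (cnt.size : Int)

-- ===== PORT B =====
def solution_alt (nums : List Int) : Int :=
  let s := PySem.List.sorted nums (fun x => x) false
  let st := s.foldl (fun (acc : Int × Option Int) x =>
      (if acc.2 = none ∨ acc.2 ≠ some x then acc.1 + 1 else acc.1, some x))
      (0, none)
  min (PySem.Int.floordiv (nums.length : Int) 2) st.1

-- ===== PRECONDITION & SPEC =====
def Spec_solution (nums : List Int) (out : Int) : Prop := out = solution_alt nums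
instance (nums : List Int) (out : Int) : Decidable (Spec_solution nums out) := by unfold Spec_solution; infer_instance

-- ===== CLAIM (what is proved, stated in full; the proofs are below) =====
def Claim_equal_solution : Prop := ∀ (nums : List Int), Dom_solution nums → Spec_solution nums (solution nums)

-- ===== LEMMAS AND PROOFS =====

-- pure-recursive form of B's adjacency scan
def cds : Option Int → List Int → Int
  | _, [] => 0
  | p, x :: t => (if p = none ∨ p ≠ some x then 1 else 0) + cds (some x) t

theorem foldl_cds (l : List Int) (c : Int) (p : Option Int) :
    (l.foldl (fun (acc : Int × Option Int) x =>
      (if acc.2 = none ∨ acc.2 ≠ some x then acc.1 + 1 else acc.1, some x)) (c, p)).1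
    = c + cds p l := by
  induction l generalizing c p with
  | nil => simp [cds]
  | cons x t ih =>
    simp only [List.foldl_cons, cds]
    rw [ih]
    split_ifs <;> ring

theorem cds_some (l : List Int) (a : Int)
    (hp : l.Pairwise (· ≤ ·)) (ha : ∀ y ∈ l, a ≤ y) :
    cds (some a) l = ((l.toFinset \ {a}).card : Int) := by
  induction l generalizing a with
  | nil => simp [cds]
  | cons x t ih =>
    have hxt : ∀ y ∈ t, x ≤ y := (List.pairwise_cons.mp hp).1
    have hpt : t.Pairwise (· ≤ ·) := (List.pairwise_cons.mp hp).2
    have hax : a ≤ x := ha x (List.mem_cons_self)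
    by_cases hxa : x = a
    · subst hxa
      simp only [cds]
      rw [ih x hpt hxt]
      have h1 : (x :: t).toFinset \ {x} = t.toFinset \ {x} := by
        simp only [List.toFinset_cons]
        exact Finset.insert_sdiff_of_mem _ (by simp)
      rw [h1]
      simp
    · have hanott : a ∉ t := fun h => hxa (le_antisymm hax (hxt a h)).symm
      simp only [cds]
      rw [ih x hpt hxt]
      have h1 : (x :: t).toFinset \ {a} = insert x t.toFinset := by
        simp only [List.toFinset_cons]
        rw [Finset.insert_sdiff_of_notMem _ (by simp [hxa])]
        congr 1
        ext y
        simp only [Finset.mem_sdiff, Finset.mem_singleton, List.mem_toFinset]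
        exact ⟨fun h => h.1, fun h => ⟨h, fun e => hanott (e ▸ h)⟩⟩
      have h2 : insert x t.toFinset = insert x (t.toFinset \ {x}) := by
        ext y
        simp only [Finset.mem_insert, Finset.mem_sdiff, Finset.mem_singleton]
        tauto
      rw [h1, h2, Finset.card_insert_of_notMem (by simp)]
      rw [if_pos (Or.inr (fun e => hxa (Option.some.inj e).symm))]
      push_cast
      ring

theorem cds_none (l : List Int) (hp : l.Pairwise (· ≤ ·)) :
    cds none l = (l.toFinset.card : Int) := by
  cases l with
  | nil => simp [cds]
  | cons x t =>
    have hxt : ∀ y ∈ t, x ≤ y := (List.pairwise_cons.mp hp).1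
    have hpt : t.Pairwise (· ≤ ·) := (List.pairwise_cons.mp hp).2
    simp only [cds]
    rw [cds_some t x hpt hxt]
    have h2 : (x :: t).toFinset = insert x (t.toFinset \ {x}) := by
      ext y
      simp only [List.toFinset_cons, Finset.mem_insert, Finset.mem_sdiff,
        Finset.mem_singleton, List.mem_toFinset]
      tauto
    rw [h2, Finset.card_insert_of_notMem (by simp)]
    simp
    ring

-- A's distinct count: the dict's size is the number of distinct elements
theorem dict_size_eq (nums : List Int) :
    ((nums.foldl (fun d n =>
      if d.contains n then d.insert n (d.getD n 0 + 1) else d.insert n 1)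
      (PySem.Dict.empty : PySem.Dict Int Int)).size : Int)
    = (nums.toFinset.card : Int) := by
  have hstep : (fun (d : PySem.Dict Int Int) n =>
      if d.contains n then d.insert n (d.getD n 0 + 1) else d.insert n 1)
      = (fun d n => d.insert n (if d.contains n then d.getD n 0 + 1 else 1)) := by
    funext d n; split_ifs <;> rfl
  rw [hstep]
  have hkeys := PySem.Dict.keys_foldl_insert (l := nums)
      (f := fun (d : PySem.Dict Int Int) n => if d.contains n then d.getD n 0 + 1 else 1)
      (d := PySem.Dict.empty)
  have hsize : ∀ (d : PySem.Dict Int Int), d.size = d.keys.length := by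
    intro d; simp [PySem.Dict.size, PySem.Dict.keys]
  rw [hsize, hkeys]
  simp only [PySem.Dict.keys_empty]
  rw [PySem.Set.update_nil_left]
  have hnd : (PySem.Set.ofList nums).Nodup := PySem.Set.nodup_ofList nums
  have hfin : (PySem.Set.ofList nums).toFinset = nums.toFinset := by
    ext y; simp [PySem.Set.mem_ofList]
  rw [← List.toFinset_card_of_nodup hnd, hfin]

-- ===== VERDICT (by name: the statement is the Claim_ definition above) =====
theorem solution_spec : Claim_equal_solution := by
  intro nums _
  unfold Spec_solution solution solution_alt
  simp only []
  rw [dict_size_eq]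
  rw [foldl_cds]
  have hp : (PySem.List.sorted nums (fun x => x) false).Pairwise (· ≤ ·) := by
    simpa using PySem.List.sorted_pairwise (xs := nums) (key := fun x => x)
  rw [cds_none _ hp]
  have : (PySem.List.sorted nums (fun x => x) false).toFinset = nums.toFinset :=
    List.toFinset_eq_of_perm _ _ (PySem.List.sorted_perm nums (fun x => x) false)
  rw [this]
  ring_nf
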